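-- pv_equiv track=rewrite | github.com/Mickael03/Projetos | Coursera/Introdução à Ciência da Computação com Python - Parte II/Semana2.py | menor_nome
-- ===== SOURCE A (Python) =====
-- def menor_nome(lista_nomes):
--
--     #Lista de nomes sem os espaços
--     nomes = [i.strip() for i in lista_nomes]
--
--     #Determinar o menor nome
--     tamanho = len(nomes[0])
--     count = 0
--     for i in range(len(nomes)):
--         if len(nomes[i]) == tamanho:
--             count += 1
--         elif len(nomes[i]) < tamanho:
--             tamanho = len(nomes[i])
--             count = 1
--
--     #Lista com os nomes ordenados por tamanho
--     lista = [i.capitalize() for i in nomes if len(i) == tamanho]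
--
--     return lista[0] #Primeiro da lista ordenarda
-- ===== SOURCE B (Python) =====
-- def menor_nome(lista_nomes):
--     return min((nome.strip() for nome in lista_nomes), key=len).capitalize()
-- ===== Notes on version B (the rewrite author's own statement) =====
-- stated objective: simpler
-- what changed: Replaces A's three passes (index loop tracking min length and a count, a filter-and-capitalize pass, then [0]) with a single min(..., key=len) over the stripped names, capitalizing only the chosen one; min's first-minimum rule reproduces A's tie-breaking.
import Mathlib
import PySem

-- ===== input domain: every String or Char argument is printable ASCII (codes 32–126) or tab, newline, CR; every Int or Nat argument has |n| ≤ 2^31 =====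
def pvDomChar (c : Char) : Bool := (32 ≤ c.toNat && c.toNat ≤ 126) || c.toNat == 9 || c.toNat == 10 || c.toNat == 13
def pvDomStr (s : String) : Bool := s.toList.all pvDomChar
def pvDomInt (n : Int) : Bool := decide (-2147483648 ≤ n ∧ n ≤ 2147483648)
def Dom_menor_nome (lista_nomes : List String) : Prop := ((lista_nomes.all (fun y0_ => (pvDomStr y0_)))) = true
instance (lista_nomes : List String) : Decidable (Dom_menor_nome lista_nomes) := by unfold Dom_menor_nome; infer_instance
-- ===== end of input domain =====

-- B computes the answer in one min(..., key=len) pass instead of A's min-length loop plus a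
-- filter-and-capitalize pass plus [0] (objective: simpler).

-- str.capitalize(): first char uppercased, the rest lowercased — exact on the ASCII domain
def pyCapitalize (s : String) : String :=
  match s.toList with
  | [] => ""
  | c :: cs => String.ofList (PySem.Chars.upperChar c :: PySem.Chars.lower cs)

-- ===== PORT A =====
-- the body of A's 'for i in range(len(nomes))' loop, state = (tamanho, count)
def passoA (st : Int × Int) (nm : String) : Int × Int :=
  if PySem.Str.len nm = st.1 then (st.1, st.2 + 1)
  else if PySem.Str.len nm < st.1 then (PySem.Str.len nm, 1)
  else st

def menor_nome (lista_nomes : List String) : String :=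
  let nomes := lista_nomes.map PySem.Str.strip
  match PySem.List.pyGet? nomes 0 with
  | none => ""  -- IndexError on the empty list; excluded by Pre_
  | some primeiro =>
    let st := (PySem.List.pyRange 0 (PySem.List.len nomes) 1).foldl
      (fun st i => passoA st (PySem.List.pyGetD nomes i "")) (PySem.Str.len primeiro, 0)
    let lista := (nomes.filter (fun i => PySem.Str.len i == st.1)).map pyCapitalize
    match PySem.List.pyGet? lista 0 with
    | none => ""
    | some r => r

-- ===== PORT B =====
def menor_nome_alt (lista_nomes : List String) : String :=
  match PySem.List.min? (lista_nomes.map PySem.Str.strip) PySem.Str.len with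
  | none => ""  -- ValueError on the empty list; excluded by Pre_
  | some m => pyCapitalize m

-- ===== PRECONDITION & SPEC =====
-- A raises IndexError (and B's min raises ValueError) on the empty list; Pre_ excludes exactly it.
def Pre_menor_nome (lista_nomes : List String) : Prop := lista_nomes ≠ []
instance (lista_nomes : List String) : Decidable (Pre_menor_nome lista_nomes) := by
  unfold Pre_menor_nome; infer_instance
def pvWitness_menor_nome : List String := ["  Maria ", "bob", "Zoe"]

def Spec_menor_nome (lista_nomes : List String) (out : String) : Prop := out = menor_nome_alt lista_nomes
instance (lista_nomes : List String) (out : String) : Decidable (Spec_menor_nome lista_nomes out) := by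
  unfold Spec_menor_nome; infer_instance

-- ===== CLAIM (what is proved, stated in full; the proofs are below) =====
def Claim_equal_menor_nome : Prop := ∀ (lista_nomes : List String), Dom_menor_nome lista_nomes → Pre_menor_nome lista_nomes → Spec_menor_nome lista_nomes (menor_nome lista_nomes)

-- ===== LEMMAS AND PROOFS =====

-- find? on a cons cell, with the predicate explicit (avoids higher-order unification slips)
theorem find?_cons_pos {α : Type} (p : α → Bool) (a : α) (l : List α) (h : p a = true) :
    List.find? p (a :: l) = some a := by simp [h]

theorem find?_cons_neg {α : Type} (p : α → Bool) (a : α) (l : List α) (h : p a = false) :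
    List.find? p (a :: l) = List.find? p l := by simp [h]

-- the running-minimum step on the length alone
def tstep (t : Int) (x : String) : Int :=
  if PySem.Str.len x = t then t else if PySem.Str.len x < t then PySem.Str.len x else t

-- min?'s foldl step, key = PySem.Str.len
def minstep (acc : Option String) (x : String) : Option String :=
  match acc with
  | none => some x
  | some m => if PySem.Str.len x < PySem.Str.len m then some x else some m

theorem tfold_le : ∀ (l : List String) (t : Int), l.foldl tstep t ≤ t := by
  intro l
  induction l with
  | nil => intro t; simp
  | cons x l ih =>
    intro t
    have h1 : tstep t x ≤ t := by unfold tstep; split_ifs <;> omega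
    calc (x :: l).foldl tstep t = l.foldl tstep (tstep t x) := rfl
      _ ≤ tstep t x := ih _
      _ ≤ t := h1

theorem pairfold_fst : ∀ (l : List String) (p : Int × Int),
    (l.foldl passoA p).1 = l.foldl tstep p.1 := by
  intro l
  induction l with
  | nil => intro p; rfl
  | cons x l ih =>
    intro p
    simp only [List.foldl_cons]
    rw [ih]
    congr 1
    unfold passoA tstep
    split_ifs <;> rfl

theorem main_lemma : ∀ (l : List String) (m : String),
    ∃ w, l.foldl minstep (some m) = some w ∧
      PySem.Str.len w = l.foldl tstep (PySem.Str.len m) ∧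
      List.find? (fun x => PySem.Str.len x == l.foldl tstep (PySem.Str.len m)) (m :: l) = some w := by
  intro l
  induction l with
  | nil =>
    intro m
    refine ⟨m, rfl, rfl, ?_⟩
    exact find?_cons_pos _ m [] (beq_iff_eq.mpr rfl)
  | cons x l ih =>
    intro m
    by_cases hlt : PySem.Str.len x < PySem.Str.len m
    · -- x strictly shorter: it becomes the new running first-minimum
      obtain ⟨w, hw1, hw2, hw3⟩ := ih x
      have hms : minstep (some m) x = some x := by
        show (if PySem.Str.len x < PySem.Str.len m then some x else some m) = some x
        rw [if_pos hlt]
      have hstep : tstep (PySem.Str.len m) x = PySem.Str.len x := by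
        unfold tstep; split_ifs <;> omega
      have hT : (x :: l).foldl tstep (PySem.Str.len m) = l.foldl tstep (PySem.Str.len x) := by
        simp only [List.foldl_cons, hstep]
      have hTle : l.foldl tstep (PySem.Str.len x) ≤ PySem.Str.len x := tfold_le l _
      refine ⟨w, ?_, ?_, ?_⟩
      · rw [List.foldl_cons, hms]; exact hw1
      · rw [hT]; exact hw2
      · rw [hT]
        rw [find?_cons_neg (fun y => PySem.Str.len y == l.foldl tstep (PySem.Str.len x)) m (x :: l)
          (beq_eq_false_iff_ne.mpr (by omega))]
        exact hw3
    · -- x not shorter: the running first-minimum stays m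
      obtain ⟨w, hw1, hw2, hw3⟩ := ih m
      have hms : minstep (some m) x = some m := by
        show (if PySem.Str.len x < PySem.Str.len m then some x else some m) = some m
        rw [if_neg hlt]
      have hstep : tstep (PySem.Str.len m) x = PySem.Str.len m := by
        unfold tstep; split_ifs <;> omega
      have hT : (x :: l).foldl tstep (PySem.Str.len m) = l.foldl tstep (PySem.Str.len m) := by
        simp only [List.foldl_cons, hstep]
      have hTle : l.foldl tstep (PySem.Str.len m) ≤ PySem.Str.len m := tfold_le l _
      refine ⟨w, ?_, ?_, ?_⟩
      · rw [List.foldl_cons, hms]; exact hw1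
      · rw [hT]; exact hw2
      · rw [hT]
        by_cases hm : PySem.Str.len m = l.foldl tstep (PySem.Str.len m)
        · -- m itself matches: find? returns m, and the IH forces w = m
          rw [find?_cons_pos (fun y => PySem.Str.len y == l.foldl tstep (PySem.Str.len m)) m l
            (beq_iff_eq.mpr hm)] at hw3
          rw [find?_cons_pos (fun y => PySem.Str.len y == l.foldl tstep (PySem.Str.len m)) m (x :: l)
            (beq_iff_eq.mpr hm)]
          exact hw3
        · rw [find?_cons_neg (fun y => PySem.Str.len y == l.foldl tstep (PySem.Str.len m)) m l
            (beq_eq_false_iff_ne.mpr hm)] at hw3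
          rw [find?_cons_neg (fun y => PySem.Str.len y == l.foldl tstep (PySem.Str.len m)) m (x :: l)
              (beq_eq_false_iff_ne.mpr hm),
              find?_cons_neg (fun y => PySem.Str.len y == l.foldl tstep (PySem.Str.len m)) x l
              (beq_eq_false_iff_ne.mpr (by omega))]
          exact hw3

theorem head?_filter_map {α β : Type} (p : α → Bool) (g : α → β) :
    ∀ (l : List α), ((l.filter p).map g).head? = (l.find? p).map g := by
  intro l
  induction l with
  | nil => rfl
  | cons x l ih =>
    by_cases h : p x
    · rw [List.filter_cons_of_pos h, find?_cons_pos p x l h]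
      rfl
    · rw [List.filter_cons_of_neg (by simpa using h), find?_cons_neg p x l (by simpa using h)]
      exact ih

-- ===== VERDICT (by name: the statement is the Claim_ definition above) =====
theorem menor_nome_spec : Claim_equal_menor_nome := by
  intro lista_nomes _hdom hpre
  unfold Spec_menor_nome
  cases lista_nomes with
  | nil => exact absurd rfl hpre
  | cons h t =>
    set sh := PySem.Str.strip h with hsh
    set rest := t.map PySem.Str.strip with hrest
    have hget : PySem.List.pyGet? (sh :: rest) 0 = some sh := by
      rw [PySem.List.pyGet?_zero]; rfl
    have hloop : (PySem.List.pyRange 0 (PySem.List.len (sh :: rest)) 1).foldl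
        (fun st i => passoA st (PySem.List.pyGetD (sh :: rest) i "")) (PySem.Str.len sh, 0)
        = (sh :: rest).foldl passoA (PySem.Str.len sh, 0) :=
      PySem.List.foldl_pyRange_zero_pyGetD (sh :: rest) "" passoA _
    have hfirst : (sh :: rest).foldl tstep (PySem.Str.len sh) = rest.foldl tstep (PySem.Str.len sh) := by
      have h1 : tstep (PySem.Str.len sh) sh = PySem.Str.len sh := by
        unfold tstep; rw [if_pos rfl]
      rw [List.foldl_cons, h1]
    obtain ⟨w, hw1, _hw2, hw3⟩ := main_lemma rest sh
    have hmin : PySem.List.min? (sh :: rest) PySem.Str.len = rest.foldl minstep (some sh) := by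
      unfold PySem.List.min?
      rw [List.foldl_cons]
      congr 1
      funext acc x
      cases acc <;> rfl
    have hT : ((sh :: rest).foldl passoA (PySem.Str.len sh, 0)).1 = rest.foldl tstep (PySem.Str.len sh) := by
      rw [pairfold_fst, hfirst]
    have hhead : PySem.List.pyGet? (((sh :: rest).filter
        (fun i => PySem.Str.len i == rest.foldl tstep (PySem.Str.len sh))).map pyCapitalize) 0
        = some (pyCapitalize w) := by
      rw [PySem.List.pyGet?_zero, ← List.head?_eq_getElem?, head?_filter_map, hw3]
      rfl
    show menor_nome (h :: t) = menor_nome_alt (h :: t)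
    unfold menor_nome menor_nome_alt
    simp only [List.map_cons, ← hrest, ← hsh, hget, hloop, hT, hhead, hmin, hw1]
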